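-- pv_equiv track=rewrite | github.com/mancristiana/advent-of-code-2020 | day6-custom-customs/two.py | getCountOfAnswersWhereEveryoneSaidYes
-- ===== SOURCE A (Python) =====
-- def getCountOfAnswersWhereEveryoneSaidYes(group):
--     answers = group.split("\n")
--     answersMap = {}
--     for answer in answers:
--         for letter in answer:
--             if (letter in answersMap.keys()):
--                 answersMap[letter] += 1
--             else:
--                 answersMap[letter] = 1
--
--     peopleCount = len(answers)
--     count = 0
--     for key in answersMap:
--         if (answersMap[key] == peopleCount):
--             count += 1
--
--     return count
-- ===== SOURCE B (Python) =====
-- def getCountOfAnswersWhereEveryoneSaidYes(group):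
--     joined = [c for c in group if c != "\n"]
--     people = len(group) - len(joined) + 1
--     count = 0
--     run = 0
--     prev = None
--     for c in sorted(joined):
--         if c == prev:
--             run += 1
--         else:
--             if run == people:
--                 count += 1
--             run = 1
--             prev = c
--     if run == people:
--         count += 1
--     return count
-- ===== Notes on version B (the rewrite author's own statement) =====
-- stated objective: alternative
-- what changed: B replaces A's occurrence-dict build and scan by sort-then-run-length-scan: it sorts the newline-stripped characters and counts maximal runs whose length equals the number of lines, with no counting container at all.
import Mathlib
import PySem

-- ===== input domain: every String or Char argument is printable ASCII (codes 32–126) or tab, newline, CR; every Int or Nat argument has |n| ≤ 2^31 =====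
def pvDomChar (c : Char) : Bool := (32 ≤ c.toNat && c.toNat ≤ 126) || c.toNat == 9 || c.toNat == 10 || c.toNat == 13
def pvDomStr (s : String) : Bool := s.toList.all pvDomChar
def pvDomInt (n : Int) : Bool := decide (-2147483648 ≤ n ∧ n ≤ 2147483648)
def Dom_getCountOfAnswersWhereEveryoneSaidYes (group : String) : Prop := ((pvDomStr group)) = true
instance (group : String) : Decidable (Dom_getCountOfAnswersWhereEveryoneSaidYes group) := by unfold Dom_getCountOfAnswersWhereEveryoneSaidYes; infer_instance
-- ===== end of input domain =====

-- B replaces A's occurrence dict by sort-then-run-length-scan over the newline-stripped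
-- characters, counting runs whose length equals the line count (objective: alternative).

-- ===== PORT A =====
def getCountOfAnswersWhereEveryoneSaidYes (group : String) : Int :=
  let answers := PySem.Chars.splitOn group.toList ['\n']
  let answersMap : PySem.Dict Char Int :=
    answers.foldl (fun d answer =>
      answer.foldl (fun d letter =>
        if d.contains letter then d.insert letter (d.getD letter 0 + 1)
        else d.insert letter 1) d) PySem.Dict.empty
  let peopleCount : Int := answers.length
  answersMap.keys.foldl (fun count key =>
    if answersMap.getD key 0 == peopleCount then count + 1 else count) 0

-- ===== PORT B =====
def getCountOfAnswersWhereEveryoneSaidYes_alt (group : String) : Int :=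
  let joined := group.toList.filter (fun c => !(c == '\n'))
  let people : Int := (group.toList.length : Int) - (joined.length : Int) + 1
  let st := (PySem.List.sorted joined (fun x => x) false).foldl
    (fun (s : Int × Int × Option Char) c =>
      if some c == s.2.2 then (s.1, s.2.1 + 1, s.2.2)
      else ((if s.2.1 == people then s.1 + 1 else s.1), 1, some c))
    ((0 : Int), (0 : Int), (none : Option Char))
  if st.2.1 == people then st.1 + 1 else st.1

-- ===== PRECONDITION & SPEC =====
def Spec_getCountOfAnswersWhereEveryoneSaidYes (group : String) (out : Int) : Prop := out = getCountOfAnswersWhereEveryoneSaidYes_alt group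
instance (group : String) (out : Int) : Decidable (Spec_getCountOfAnswersWhereEveryoneSaidYes group out) := by unfold Spec_getCountOfAnswersWhereEveryoneSaidYes; infer_instance

-- ===== CLAIM (what is proved, stated in full; the proofs are below) =====
def Claim_equal_getCountOfAnswersWhereEveryoneSaidYes : Prop := ∀ (group : String), Dom_getCountOfAnswersWhereEveryoneSaidYes group → Spec_getCountOfAnswersWhereEveryoneSaidYes group (getCountOfAnswersWhereEveryoneSaidYes group)

-- ===== LEMMAS AND PROOFS =====

-- prepend p to the head group of a split (the empty split gets the single group [p])
def mhp (p : List Char) : List (List Char) → List (List Char)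
  | [] => [p]
  | r :: rs => (p ++ r) :: rs

-- simple structural specification of splitting on '\n'
def spl : List Char → List (List Char)
  | [] => [[]]
  | c :: rest => if c = '\n' then [] :: spl rest else mhp [c] (spl rest)

theorem spl_ne_nil (l : List Char) : spl l ≠ [] := by
  cases l with
  | nil => simp [spl]
  | cons c rest =>
    simp only [spl]
    split
    · simp
    · cases h : spl rest <;> simp [mhp]

theorem mhp_mhp (p q : List Char) (x : List (List Char)) :
    mhp p (mhp q x) = mhp (p ++ q) x := by
  cases x <;> simp [mhp]

theorem go_spec : ∀ (l : List Char) (fuel : Nat), l.length ≤ fuel →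
    ∀ (cur : List Char) (acc : List (List Char)),
    PySem.Chars.splitOn.go ['\n'] fuel l cur acc = acc.reverse ++ mhp cur.reverse (spl l) := by
  intro l
  induction l with
  | nil =>
    intro fuel _ cur acc
    cases fuel <;> simp [PySem.Chars.splitOn.go, mhp, spl]
  | cons c rest ih =>
    intro fuel hf cur acc
    cases fuel with
    | zero => simp at hf
    | succ f =>
      simp only [PySem.Chars.splitOn.go]
      by_cases hc : c = '\n'
      · subst hc
        rw [if_pos (by simp [List.isPrefixOf])]
        simp only [List.length_singleton, List.drop_one, List.tail_cons]
        rw [ih f (by simp at hf; omega) [] (cur.reverse :: acc)]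
        cases h : spl rest with
        | nil => exact absurd h (spl_ne_nil rest)
        | cons r rs => simp [spl, mhp, h]
      · rw [if_neg (by simp [List.isPrefixOf]; intro h; exact hc h.symm)]
        rw [ih f (by simp at hf; omega) (c :: cur) acc]
        simp [spl, hc, mhp_mhp]

theorem splitOn_newline (l : List Char) :
    PySem.Chars.splitOn l ['\n'] = spl l := by
  unfold PySem.Chars.splitOn
  rw [go_spec l (l.length + 1) (by omega) [] []]
  cases h : spl l with
  | nil => exact absurd h (spl_ne_nil l)
  | cons r rs => simp [mhp]

theorem spl_flat (l : List Char) : (spl l).flatMap id = l.filter (fun c => !(c == '\n')) := by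
  induction l with
  | nil => simp [spl]
  | cons c rest ih =>
    by_cases hc : c = '\n'
    · subst hc; simp [spl, ih]
    · simp only [spl, if_neg hc]
      cases h : spl rest with
      | nil => exact absurd h (spl_ne_nil rest)
      | cons r rs =>
        rw [h] at ih
        simp_all [mhp]

theorem spl_len (l : List Char) : (spl l).length = l.count '\n' + 1 := by
  induction l with
  | nil => simp [spl]
  | cons c rest ih =>
    by_cases hc : c = '\n'
    · subst hc; simp [spl, ih]
    · simp only [spl, if_neg hc]
      cases h : spl rest with
      | nil => exact absurd h (spl_ne_nil rest)
      | cons r rs =>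
        rw [h] at ih
        simp_all [mhp]

-- A's branchy dict-update step is the unconditional counter step
theorem step_eq :
    (fun (d : PySem.Dict Char Int) (letter : Char) =>
      if d.contains letter then d.insert letter (d.getD letter 0 + 1)
      else d.insert letter 1)
    = (fun d x => d.insert x (d.getD x 0 + 1)) := by
  funext d letter
  by_cases h : d.contains letter
  · simp [h]
  · simp only [h, Bool.false_eq_true, if_false]
    rw [PySem.Dict.getD_of_not_contains d 0 (by simpa using h)]
    norm_num

-- A's nested dict-building loop produces Counter(joined chars)
theorem map_eq_counter (answers : List (List Char)) :
    answers.foldl (fun d answer =>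
      answer.foldl (fun d letter =>
        if d.contains letter then d.insert letter (d.getD letter 0 + 1)
        else d.insert letter 1) d) (PySem.Dict.empty (κ := Char) (ν := Int))
    = PySem.Dict.counter (answers.flatMap id) := by
  rw [← PySem.Dict.foldl_insert_getD_add_one_eq_counter, List.foldl_flatMap]
  simp [step_eq]

def dc (p : Int) : List Char → Int
  | [] => 0
  | b :: t =>
      (if ((1 + t.count b : Nat) : Int) = p then 1 else 0)
        + dc p (t.filter (fun x => !(x == b)))
termination_by l => l.length
decreasing_by
  simp only [List.length_cons, List.length_unattach]
  refine Nat.lt_succ_of_le (le_trans (List.length_filter_le _ _) ?_)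
  rw [List.length_attach]

theorem dc_nil (p : Int) : dc p [] = 0 := by rw [dc]
theorem dc_cons (p : Int) (b : Char) (t : List Char) :
    dc p (b :: t) = (if ((1 + t.count b : Nat) : Int) = p then 1 else 0)
        + dc p (t.filter (fun x => !(x == b))) := by rw [dc]

theorem dc_eq (p : Int) : ∀ (l : List Char),
    dc p l = ((l.toFinset.filter (fun x => ((l.count x : Nat) : Int) = p)).card : Int) := by
  intro l
  induction l using dc.induct with
  | case1 => simp [dc_nil]
  | case2 b t ih =>
    simp only [List.unattach_filter, List.unattach_attach] at ih
    rw [dc_cons, ih]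
    have hset : {x ∈ (List.filter (fun x => !x == b) t).toFinset |
        ((List.count x (List.filter (fun x => !x == b) t) : Nat) : Int) = p}
        = {x ∈ t.toFinset.erase b | ((List.count x t : Nat) : Int) = p} := by
      ext x
      by_cases hx : x = b
      · subst hx; simp
      · simp [List.count_filter, hx]
    have hsplit : {x ∈ (b :: t).toFinset | ((List.count x (b :: t) : Nat) : Int) = p}
        = (if ((1 + t.count b : Nat) : Int) = p then ({b} : Finset Char) else ∅)
          ∪ {x ∈ t.toFinset.erase b | ((List.count x t : Nat) : Int) = p} := by
      ext x
      by_cases hx : x = b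
      · subst hx
        simp [List.count_cons_self]
        split_ifs with h <;> push_cast at h ⊢ <;> simp <;> omega
      · have hbx : (b == x) = false := by
          simp only [beq_eq_false_iff_ne, ne_eq]
          exact fun h => hx h.symm
        simp [List.count_cons]
        split_ifs with h <;> simp_all
    rw [hset, hsplit]
    rw [Finset.card_union_of_disjoint (by
      split_ifs <;> simp [Finset.disjoint_left])]
    split_ifs with h <;> simp

theorem run_foldl (p : Int) : ∀ (s : List Char), s.Pairwise (· ≤ ·) →
    ∀ (c : Char), (∀ x ∈ s, c ≤ x) → ∀ (k cnt : Int),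
    (let st := s.foldl
      (fun (st : Int × Int × Option Char) x =>
        if some x == st.2.2 then (st.1, st.2.1 + 1, st.2.2)
        else ((if st.2.1 == p then st.1 + 1 else st.1), 1, some x)) (cnt, k, some c);
     if st.2.1 == p then st.1 + 1 else st.1)
    = cnt + (if (k + (s.count c : Int)) = p then 1 else 0)
        + dc p (s.filter (fun x => !(x == c))) := by
  intro s
  induction s with
  | nil =>
    intro _ c _ k cnt
    simp only [List.foldl_nil, List.count_nil, List.filter_nil, dc_nil, beq_iff_eq]
    split_ifs <;> simp_all
  | cons b t ih =>
    intro hpw c hle k cnt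
    have hpt : t.Pairwise (· ≤ ·) := hpw.tail
    have hbt : ∀ x ∈ t, b ≤ x := fun x hx => (List.pairwise_cons.mp hpw).1 x hx
    by_cases hbc : b = c
    · subst hbc
      have hF : (fun (st : Int × Int × Option Char) x =>
            if some x == st.2.2 then (st.1, st.2.1 + 1, st.2.2)
            else ((if st.2.1 == p then st.1 + 1 else st.1), 1, some x)) (cnt, k, some b) b
          = (cnt, k + 1, some b) := by simp
      simp only [List.foldl_cons, hF]
      have hih := ih hpt b hbt (k + 1) cnt
      simp only at hih ⊢
      rw [hih]
      have hf : (b :: t).filter (fun x => !(x == b)) = t.filter (fun x => !(x == b)) := by simp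
      rw [hf]
      simp only [List.count_cons_self]
      push_cast
      split_ifs <;> first | (exfalso; omega) | ring
    · have hclt : ∀ x ∈ b :: t, c < x := by
        intro x hx
        rcases List.mem_cons.mp hx with h | h
        · subst h; exact lt_of_le_of_ne (hle x (List.mem_cons_self)) (fun h => hbc h.symm)
        · exact lt_of_lt_of_le (lt_of_le_of_ne (hle b List.mem_cons_self) (fun h => hbc h.symm)) (hbt x h)
      have hF : (fun (st : Int × Int × Option Char) x =>
            if some x == st.2.2 then (st.1, st.2.1 + 1, st.2.2)
            else ((if st.2.1 == p then st.1 + 1 else st.1), 1, some x)) (cnt, k, some c) b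
          = ((if k == p then cnt + 1 else cnt), 1, some b) := by
        have : (some b == some c) = false := by simp [hbc]
        simp [this]
      simp only [List.foldl_cons, hF]
      have hih := ih hpt b hbt 1 (if k == p then cnt + 1 else cnt)
      simp only at hih ⊢
      rw [hih]
      have hcount : (b :: t).count c = 0 :=
        List.count_eq_zero_of_not_mem (fun h => lt_irrefl c (hclt c h))
      have hfilt : (b :: t).filter (fun x => !(x == c)) = b :: t := by
        rw [List.filter_eq_self]
        intro x hx
        simp only [Bool.not_eq_eq_eq_not, Bool.not_true, beq_eq_false_iff_ne, ne_eq]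
        exact fun h => lt_irrefl c (h ▸ hclt x hx)
      rw [hcount, hfilt, dc_cons]
      simp only [beq_iff_eq]
      push_cast
      split_ifs <;> first | (exfalso; omega) | ring

-- dc depends only on the multiset of letters
theorem dc_perm (p : Int) (l1 l2 : List Char) (h : l1.Perm l2) : dc p l1 = dc p l2 := by
  have hfs : l1.toFinset = l2.toFinset := by
    ext x; simp [List.mem_toFinset, h.mem_iff]
  rw [dc_eq, dc_eq, hfs]
  congr 1
  congr 1
  apply Finset.filter_congr
  intro x _
  rw [h.count_eq]

theorem countP_nodup_card (s : List Char) (hs : s.Nodup) (q : Char → Bool) :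
    s.countP q = (s.toFinset.filter (fun x => q x = true)).card := by
  rw [List.countP_eq_length_filter, ← List.toFinset_card_of_nodup (hs.filter q),
    List.toFinset_filter]

theorem ofList_toFinset (l : List Char) :
    (PySem.Set.ofList l).toFinset = l.toFinset := by
  ext x
  simp [List.mem_toFinset, PySem.Set.mem_ofList]

-- A's counted quantity is dc
theorem countP_set_eq_dc (p : Int) (l : List Char) :
    (((PySem.Set.ofList l).countP (fun x => ((l.count x : Nat) : Int) == p) : Nat) : Int)
      = dc p l := by
  rw [countP_nodup_card _ (PySem.Set.nodup_ofList l), ofList_toFinset, dc_eq]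
  congr 1
  congr 1
  apply Finset.filter_congr
  intro x _
  simp [beq_iff_eq]

theorem getCountOfAnswersWhereEveryoneSaidYes_eq_alt (group : String) :
    getCountOfAnswersWhereEveryoneSaidYes group = getCountOfAnswersWhereEveryoneSaidYes_alt group := by
  unfold getCountOfAnswersWhereEveryoneSaidYes getCountOfAnswersWhereEveryoneSaidYes_alt
  simp only [splitOn_newline, map_eq_counter, spl_flat, spl_len,
    PySem.Dict.keys_counter, PySem.Dict.getD_counter, PySem.List.foldl_if_add_one]
  set cs := group.toList with hcs
  set joined := cs.filter (fun c => !(c == '\n')) with hj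
  have hlen : joined.length + cs.count '\n' = cs.length := by
    have hsplitP := List.length_eq_countP_add_countP (fun c => !(c == '\n')) (l := cs)
    have h2 : List.countP (fun a => decide ¬((fun c => !(c == '\n')) a = true)) cs = cs.count '\n' := by
      simp only [List.count]
      congr 1
      funext a
      rw [Bool.eq_iff_iff]
      simp
    rw [h2] at hsplitP
    rw [hj, ← List.countP_eq_length_filter]
    omega
  have hpe : ((cs.count '\n' + 1 : Nat) : Int) = (cs.length : Int) - (joined.length : Int) + 1 := by
    push_cast
    omega
  rw [← hpe]
  set p := ((cs.count '\n' + 1 : Nat) : Int) with hp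
  rw [zero_add, countP_set_eq_dc]
  have h0p : ¬((0 : Int) = p) := by rw [hp]; push_cast; omega
  cases hs : PySem.List.sorted joined (fun x => x) false with
  | nil =>
    have hj0 : joined = [] := by
      exact (PySem.List.sorted_eq_nil_iff joined (fun x => x) false).mp hs
    simp only [List.foldl_nil, beq_iff_eq, if_neg h0p]
    rw [hj0, dc_nil]
  | cons m t =>
    have hpw : (m :: t).Pairwise (· ≤ ·) := by
      have hsp := PySem.List.sorted_pairwise joined (fun x => x)
      rw [hs] at hsp
      exact hsp
    have hmt : ∀ x ∈ t, m ≤ x := (List.pairwise_cons.mp hpw).1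
    have hF : (fun (st : Int × Int × Option Char) c =>
          if some c == st.2.2 then (st.1, st.2.1 + 1, st.2.2)
          else ((if st.2.1 == p then st.1 + 1 else st.1), 1, some c))
          ((0 : Int), (0 : Int), (none : Option Char)) m
        = ((0 : Int), (1 : Int), some m) := by
      simp [beq_iff_eq, h0p]
    simp only [List.foldl_cons, hF]
    have hrun := run_foldl p t hpw.tail m hmt 1 0
    simp only at hrun ⊢
    rw [hrun]
    have hperm : joined.Perm (m :: t) := by
      have hsperm := PySem.List.sorted_perm joined (fun x => x) false
      rw [hs] at hsperm
      exact hsperm.symm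
    rw [dc_perm p joined (m :: t) hperm, dc_cons]
    push_cast
    split_ifs <;> ring


-- ===== VERDICT (by name: the statement is the Claim_ definition above) =====
theorem getCountOfAnswersWhereEveryoneSaidYes_spec : Claim_equal_getCountOfAnswersWhereEveryoneSaidYes := by
  intro group _
  unfold Spec_getCountOfAnswersWhereEveryoneSaidYes
  exact getCountOfAnswersWhereEveryoneSaidYes_eq_alt group
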